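-- pv_equiv track=rewrite | github.com/GatoaoCubo/cex | _tools/cex_schema_hydrate.py | generate_capabilities
-- ===== SOURCE A (Python) =====
-- def generate_capabilities(fm: dict, body: str) -> str:
--     """Generate 3-layer capabilities from manifest content."""
--     kind = fm.get("domain", fm.get("id", "unknown")).replace("-builder", "").replace("-", "_")
--     identity = ""
--     caps = ""
--     for line in body.split("\n"):
--         if line.startswith("## Identity"):
--             identity = ""
--         elif identity == "" and line.strip() and not line.startswith("#") and not line.startswith("<!--"):
--             identity = line.strip()
--         if line.startswith("## Capabilities"):
--             caps = ""
--         elif caps == "" and line.strip().startswith("- ") and not line.startswith("<!--"):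
--             caps = line.strip("- ").strip()
--
--     l1 = identity if identity else f"Builds {kind} artifacts"
--     l2 = caps if caps else "Via 8F pipeline with schema validation"
--     l3 = f"When user needs to create, build, or scaffold {kind.replace('_', ' ')}"
--
--     desc = f"L1: {l1[:80]}. L2: {l2[:80]}. L3: {l3[:80]}."
--     return desc
-- ===== SOURCE B (Python) =====
-- def _zone(lines, header):
--     """Suffix of lines strictly after the LAST line starting with header
--     (the whole list if no such line)."""
--     out = []
--     for line in reversed(lines):
--         if line.startswith(header):
--             break
--         out.append(line)
--     return out[::-1]
--
--
-- def _first_identity(lines):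
--     for line in lines:
--         if line.strip() and not line.startswith("#") and not line.startswith("<!--"):
--             return line.strip()
--     return ""
--
--
-- def _first_caps(lines):
--     for line in lines:
--         if line.strip().startswith("- ") and not line.startswith("<!--") and line.strip("- ").strip():
--             return line.strip("- ").strip()
--     return ""
--
--
-- def generate_capabilities(fm: dict, body: str) -> str:
--     """Generate 3-layer capabilities from manifest content."""
--     kind = fm.get("domain", fm.get("id", "unknown")).replace("-builder", "").replace("-", "_")
--     lines = body.split("\n")
--     identity = _first_identity(_zone(lines, "## Identity"))
--     caps = _first_caps(_zone(lines, "## Capabilities"))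
--     l1 = identity or "Builds %s artifacts" % kind
--     l2 = caps or "Via 8F pipeline with schema validation"
--     l3 = "When user needs to create, build, or scaffold %s" % kind.replace("_", " ")
--     return "L1: %s. L2: %s. L3: %s." % (l1[:80], l2[:80], l3[:80])
-- ===== Notes on version B (the rewrite author's own statement) =====
-- stated objective: alternative
-- what changed: A's single interleaved overwrite state machine over all lines is replaced by locating the zone after the LAST '## Identity' / '## Capabilities' header (backward scan) and forward-scanning each zone for the first eligible line.
import Mathlib
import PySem

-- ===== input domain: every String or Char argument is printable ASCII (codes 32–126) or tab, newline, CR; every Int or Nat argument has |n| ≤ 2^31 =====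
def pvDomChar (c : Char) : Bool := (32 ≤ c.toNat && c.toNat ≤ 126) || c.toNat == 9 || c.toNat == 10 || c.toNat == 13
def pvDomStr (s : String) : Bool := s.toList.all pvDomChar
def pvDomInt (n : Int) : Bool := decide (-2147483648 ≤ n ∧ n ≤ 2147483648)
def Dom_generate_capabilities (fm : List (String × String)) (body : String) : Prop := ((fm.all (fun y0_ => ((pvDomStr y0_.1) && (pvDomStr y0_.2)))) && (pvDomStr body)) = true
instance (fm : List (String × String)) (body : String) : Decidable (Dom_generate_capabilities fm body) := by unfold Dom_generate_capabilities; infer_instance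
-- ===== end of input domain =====

-- B replaces A's interleaved overwrite state machine by locating the zone after the
-- LAST header of each section and scanning it for the first eligible line (objective:
-- alternative decomposition, same cost).

-- ===== PORT A =====
-- literal transliteration of A: one fold over the lines with the pair state (identity, caps)
def generate_capabilities (fm : List (String × String)) (body : String) : String :=
  let kind := PySem.Str.replace (PySem.Str.replace
      (PySem.Dict.getD (PySem.Dict.ofList fm) "domain"
        (PySem.Dict.getD (PySem.Dict.ofList fm) "id" "unknown")) "-builder" "") "-" "_"
  let st := ((PySem.Str.split? body "\n").getD []).foldl
    (fun s line =>
      ((if PySem.Str.startswith line "## Identity" = true then ""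
        else if s.1 = "" ∧ PySem.Str.strip line ≠ "" ∧
            PySem.Str.startswith line "#" = false ∧ PySem.Str.startswith line "<!--" = false then
          PySem.Str.strip line
        else s.1),
       (if PySem.Str.startswith line "## Capabilities" = true then ""
        else if s.2 = "" ∧ PySem.Str.startswith (PySem.Str.strip line) "- " = true ∧
            PySem.Str.startswith line "<!--" = false then
          PySem.Str.strip (PySem.Str.stripChars line "- ")
        else s.2)))
    ("", "")
  let identity := st.1
  let caps := st.2
  let l1 := if identity ≠ "" then identity else "Builds " ++ kind ++ " artifacts"
  let l2 := if caps ≠ "" then caps else "Via 8F pipeline with schema validation"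
  let l3 := "When user needs to create, build, or scaffold " ++ PySem.Str.replace kind "_" " "
  "L1: " ++ PySem.Str.slice l1 none (some 80) ++ ". L2: " ++ PySem.Str.slice l2 none (some 80) ++
    ". L3: " ++ PySem.Str.slice l3 none (some 80) ++ "."

-- ===== PORT B =====
-- _zone: walk the lines backwards, collecting until the last header line; reverse at the end
def pvZoneRev (header : String) : List String → List String
  | [] => []
  | l :: ls => if PySem.Str.startswith l header = true then [] else l :: pvZoneRev header ls

def pvZone (lines : List String) (header : String) : List String :=
  (pvZoneRev header lines.reverse).reverse

def pvFirstIdentity : List String → String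
  | [] => ""
  | l :: ls =>
    if PySem.Str.strip l ≠ "" ∧ PySem.Str.startswith l "#" = false ∧
        PySem.Str.startswith l "<!--" = false then
      PySem.Str.strip l
    else pvFirstIdentity ls

def pvFirstCaps : List String → String
  | [] => ""
  | l :: ls =>
    if PySem.Str.startswith (PySem.Str.strip l) "- " = true ∧
        PySem.Str.startswith l "<!--" = false ∧
        PySem.Str.strip (PySem.Str.stripChars l "- ") ≠ "" then
      PySem.Str.strip (PySem.Str.stripChars l "- ")
    else pvFirstCaps ls

def generate_capabilities_alt (fm : List (String × String)) (body : String) : String :=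
  let kind := PySem.Str.replace (PySem.Str.replace
      (PySem.Dict.getD (PySem.Dict.ofList fm) "domain"
        (PySem.Dict.getD (PySem.Dict.ofList fm) "id" "unknown")) "-builder" "") "-" "_"
  let lines := (PySem.Str.split? body "\n").getD []
  let identity := pvFirstIdentity (pvZone lines "## Identity")
  let caps := pvFirstCaps (pvZone lines "## Capabilities")
  let l1 := if identity ≠ "" then identity else "Builds " ++ kind ++ " artifacts"
  let l2 := if caps ≠ "" then caps else "Via 8F pipeline with schema validation"
  let l3 := "When user needs to create, build, or scaffold " ++ PySem.Str.replace kind "_" " "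
  "L1: " ++ PySem.Str.slice l1 none (some 80) ++ ". L2: " ++ PySem.Str.slice l2 none (some 80) ++
    ". L3: " ++ PySem.Str.slice l3 none (some 80) ++ "."

-- ===== PRECONDITION & SPEC =====
def Spec_generate_capabilities (fm : List (String × String)) (body : String) (out : String) : Prop := out = generate_capabilities_alt fm body
instance (fm : List (String × String)) (body : String) (out : String) : Decidable (Spec_generate_capabilities fm body out) := by unfold Spec_generate_capabilities; infer_instance

-- ===== CLAIM (what is proved, stated in full; the proofs are below) =====
def Claim_equal_generate_capabilities : Prop := ∀ (fm : List (String × String)) (body : String), Dom_generate_capabilities fm body → Spec_generate_capabilities fm body (generate_capabilities fm body)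

-- ===== LEMMAS AND PROOFS =====

-- generic "first eligible value" scan; pvFirstIdentity / pvFirstCaps are instances
def pvFirstV (elig : String → Bool) (val : String → String) : List String → String
  | [] => ""
  | l :: ls => if elig l then val l else pvFirstV elig val ls

lemma pvFirstIdentity_eq (ls : List String) :
    pvFirstIdentity ls = pvFirstV
      (fun l => decide (PySem.Str.strip l ≠ "") && !PySem.Str.startswith l "#" &&
        !PySem.Str.startswith l "<!--")
      PySem.Str.strip ls := by
  induction ls with
  | nil => rfl
  | cons l ls ih =>
    simp only [pvFirstIdentity, pvFirstV, ih]
    by_cases h1 : PySem.Str.strip l ≠ "" <;>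
      by_cases h2 : PySem.Str.startswith l "#" = false <;>
        by_cases h3 : PySem.Str.startswith l "<!--" = false <;>
          simp_all

lemma pvFirstCaps_eq (ls : List String) :
    pvFirstCaps ls = pvFirstV
      (fun l => PySem.Str.startswith (PySem.Str.strip l) "- " &&
        !PySem.Str.startswith l "<!--" &&
        decide (PySem.Str.strip (PySem.Str.stripChars l "- ") ≠ ""))
      (fun l => PySem.Str.strip (PySem.Str.stripChars l "- ")) ls := by
  induction ls with
  | nil => rfl
  | cons l ls ih =>
    simp only [pvFirstCaps, pvFirstV, ih]
    by_cases h1 : PySem.Str.startswith (PySem.Str.strip l) "- " = true <;>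
      by_cases h2 : PySem.Str.startswith l "<!--" = false <;>
        by_cases h3 : PySem.Str.strip (PySem.Str.stripChars l "- ") ≠ "" <;>
          simp_all

lemma pvZoneRev_append (header : String) (xs ys : List String) :
    pvZoneRev header (xs ++ ys) =
      if xs.any (fun l => PySem.Str.startswith l header) then pvZoneRev header xs
      else xs ++ pvZoneRev header ys := by
  induction xs with
  | nil => simp
  | cons x xs ih =>
    simp only [List.cons_append, pvZoneRev, List.any_cons, ih]
    cases hx : PySem.Str.startswith x header with
    | true => simp
    | false =>
      cases hh : xs.any (fun l => PySem.Str.startswith l header) with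
      | true => simp
      | false => simp

lemma pvZone_cons (header : String) (l : String) (ls : List String) :
    pvZone (l :: ls) header =
      if ls.any (fun l => PySem.Str.startswith l header) then pvZone ls header
      else if PySem.Str.startswith l header then ls else l :: ls := by
  have h1 : (l :: ls).reverse = ls.reverse ++ [l] := by simp
  rw [pvZone, h1, pvZoneRev_append]
  cases hh : ls.any (fun l => PySem.Str.startswith l header) with
  | true =>
    have hh' : ls.reverse.any (fun l => PySem.Str.startswith l header) = true := by
      simpa [List.any_reverse] using hh
    rw [hh']
    simp [pvZone]
  | false =>
    have hh' : ls.reverse.any (fun l => PySem.Str.startswith l header) = false := by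
      simpa [List.any_reverse] using hh
    rw [hh']
    cases hl : PySem.Str.startswith l header with
    | true =>
      have h2 : pvZoneRev header [l] = [] := by
        simp only [pvZoneRev]; rw [if_pos hl]
      rw [h2]; simp
    | false =>
      have h2 : pvZoneRev header [l] = [l] := by
        simp only [pvZoneRev]; rw [if_neg (by rw [hl]; exact Bool.false_ne_true)]
      rw [h2]; simp

lemma pvZone_of_no_header (header : String) (ls : List String)
    (h : ls.any (fun l => PySem.Str.startswith l header) = false) :
    pvZone ls header = ls := by
  induction ls with
  | nil => rfl
  | cons l ls ih =>
    simp only [List.any_cons, Bool.or_eq_false_iff] at h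
    rw [pvZone_cons, h.2, h.1]
    simp

-- the core equivalence: A's overwrite machine for one section equals
-- "first eligible value in the zone after the last header"
lemma pvRun_eq (header : String) (elig : String → Bool) (val : String → String)
    (hval : ∀ l, elig l = true → val l ≠ "") :
    ∀ (ls : List String) (s : String),
      ls.foldl (fun s l =>
          if PySem.Str.startswith l header = true then ""
          else if s = "" ∧ elig l = true then val l
          else s) s =
      if ls.any (fun l => PySem.Str.startswith l header) then
        pvFirstV elig val (pvZone ls header)
      else if s = "" then pvFirstV elig val ls else s := by
  intro ls
  induction ls with
  | nil => intro s; simp [pvFirstV]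
  | cons l ls ih =>
    intro s
    rw [List.foldl_cons, ih, pvZone_cons, List.any_cons]
    cases hh : ls.any (fun l => PySem.Str.startswith l header) with
    | true => simp
    | false =>
      simp only [Bool.or_false, Bool.false_eq_true, if_false]
      cases hl : PySem.Str.startswith l header with
      | true => simp
      | false =>
        simp only [Bool.false_eq_true, if_false]
        by_cases he : s = "" ∧ elig l = true
        · have hv : val l ≠ "" := hval l he.2
          rw [if_pos he, if_neg hv, if_pos he.1]
          simp only [pvFirstV]
          rw [if_pos he.2]
        · rw [if_neg he]
          by_cases hs : s = ""
          · have hel : elig l = false := by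
              cases h' : elig l
              · rfl
              · exact absurd ⟨hs, h'⟩ he
            rw [if_pos hs, if_pos hs]
            simp only [pvFirstV]
            rw [if_neg (by simp [hel])]
          · rw [if_neg hs, if_neg hs]

-- identity machine: A's condition already forces a non-empty stored value
lemma pvIdentity_eq (lines : List String) :
    lines.foldl (fun s line =>
        if PySem.Str.startswith line "## Identity" = true then ""
        else if s = "" ∧ PySem.Str.strip line ≠ "" ∧
            PySem.Str.startswith line "#" = false ∧
            PySem.Str.startswith line "<!--" = false then
          PySem.Str.strip line
        else s) "" =
      pvFirstIdentity (pvZone lines "## Identity") := by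
  have hstep : ∀ (s : String) (line : String), line ∈ lines →
      (if PySem.Str.startswith line "## Identity" = true then ""
       else if s = "" ∧ PySem.Str.strip line ≠ "" ∧
           PySem.Str.startswith line "#" = false ∧
           PySem.Str.startswith line "<!--" = false then PySem.Str.strip line
       else s) =
      (if PySem.Str.startswith line "## Identity" = true then ""
       else if s = "" ∧ (decide (PySem.Str.strip line ≠ "") && !PySem.Str.startswith line "#" &&
           !PySem.Str.startswith line "<!--") = true then PySem.Str.strip line
       else s) := by
    intro s line _
    by_cases h1 : PySem.Str.strip line ≠ "" <;>
      by_cases h2 : PySem.Str.startswith line "#" = false <;>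
        by_cases h3 : PySem.Str.startswith line "<!--" = false <;>
          simp_all
  rw [PySem.List.foldl_congr_mem lines
    (fun s line =>
      if PySem.Str.startswith line "## Identity" = true then ""
      else if s = "" ∧ PySem.Str.strip line ≠ "" ∧
          PySem.Str.startswith line "#" = false ∧
          PySem.Str.startswith line "<!--" = false then PySem.Str.strip line
      else s)
    (fun s line =>
      if PySem.Str.startswith line "## Identity" = true then ""
      else if s = "" ∧ (decide (PySem.Str.strip line ≠ "") && !PySem.Str.startswith line "#" &&
          !PySem.Str.startswith line "<!--") = true then PySem.Str.strip line
      else s)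
    "" (fun s line hmem => hstep s line hmem)]
  rw [pvRun_eq "## Identity" _ PySem.Str.strip
    (fun l h => by
      rw [Bool.and_assoc] at h
      have := (Bool.and_eq_true _ _).mp h
      simpa using this.1)]
  cases hh : lines.any (fun l => PySem.Str.startswith l "## Identity") with
  | true => rw [if_pos rfl, pvFirstIdentity_eq]
  | false =>
    rw [if_neg (by simp), if_pos rfl, pvFirstIdentity_eq,
      pvZone_of_no_header _ _ hh]

-- caps machine: A may "set" caps to the empty string (a no-op); strengthening the
-- eligibility test by val ≠ "" leaves the step function unchanged
lemma pvCaps_eq (lines : List String) :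
    lines.foldl (fun s line =>
        if PySem.Str.startswith line "## Capabilities" = true then ""
        else if s = "" ∧ PySem.Str.startswith (PySem.Str.strip line) "- " = true ∧
            PySem.Str.startswith line "<!--" = false then
          PySem.Str.strip (PySem.Str.stripChars line "- ")
        else s) "" =
      pvFirstCaps (pvZone lines "## Capabilities") := by
  have hstep : ∀ (s : String) (line : String), line ∈ lines →
      (if PySem.Str.startswith line "## Capabilities" = true then ""
       else if s = "" ∧ PySem.Str.startswith (PySem.Str.strip line) "- " = true ∧
           PySem.Str.startswith line "<!--" = false then
         PySem.Str.strip (PySem.Str.stripChars line "- ")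
       else s) =
      (if PySem.Str.startswith line "## Capabilities" = true then ""
       else if s = "" ∧ (PySem.Str.startswith (PySem.Str.strip line) "- " &&
           !PySem.Str.startswith line "<!--" &&
           decide (PySem.Str.strip (PySem.Str.stripChars line "- ") ≠ "")) = true then
         PySem.Str.strip (PySem.Str.stripChars line "- ")
       else s) := by
    intro s line _
    by_cases h1 : PySem.Str.startswith (PySem.Str.strip line) "- " = true <;>
      by_cases h2 : PySem.Str.startswith line "<!--" = false <;>
        by_cases h3 : PySem.Str.strip (PySem.Str.stripChars line "- ") = "" <;>
          by_cases hs : s = "" <;>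
            simp_all
  rw [PySem.List.foldl_congr_mem lines
    (fun s line =>
      if PySem.Str.startswith line "## Capabilities" = true then ""
      else if s = "" ∧ PySem.Str.startswith (PySem.Str.strip line) "- " = true ∧
          PySem.Str.startswith line "<!--" = false then
        PySem.Str.strip (PySem.Str.stripChars line "- ")
      else s)
    (fun s line =>
      if PySem.Str.startswith line "## Capabilities" = true then ""
      else if s = "" ∧ (PySem.Str.startswith (PySem.Str.strip line) "- " &&
          !PySem.Str.startswith line "<!--" &&
          decide (PySem.Str.strip (PySem.Str.stripChars line "- ") ≠ "")) = true then
        PySem.Str.strip (PySem.Str.stripChars line "- ")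
      else s)
    "" (fun s line hmem => hstep s line hmem)]
  rw [pvRun_eq "## Capabilities" _ _
    (fun l h => by
      have := (Bool.and_eq_true _ _).mp h
      simpa using this.2)]
  cases hh : lines.any (fun l => PySem.Str.startswith l "## Capabilities") with
  | true => rw [if_pos rfl, pvFirstCaps_eq]
  | false =>
    rw [if_neg (by simp), if_pos rfl, pvFirstCaps_eq,
      pvZone_of_no_header _ _ hh]

-- ===== VERDICT (by name: the statement is the Claim_ definition above) =====
theorem generate_capabilities_spec : Claim_equal_generate_capabilities := by
  intro fm body _
  unfold Spec_generate_capabilities generate_capabilities generate_capabilities_alt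
  rw [PySem.List.foldl_prod_mk
    (f := fun s line =>
      if PySem.Str.startswith line "## Identity" = true then ""
      else if s = "" ∧ PySem.Str.strip line ≠ "" ∧
          PySem.Str.startswith line "#" = false ∧ PySem.Str.startswith line "<!--" = false then
        PySem.Str.strip line
      else s)
    (g := fun s line =>
      if PySem.Str.startswith line "## Capabilities" = true then ""
      else if s = "" ∧ PySem.Str.startswith (PySem.Str.strip line) "- " = true ∧
          PySem.Str.startswith line "<!--" = false then
        PySem.Str.strip (PySem.Str.stripChars line "- ")
      else s)]
  rw [pvIdentity_eq, pvCaps_eq]
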